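-- pv_equiv track=rewrite | github.com/Louie2074/oura-email | weekly_report.py | _extremes
-- ===== SOURCE A (Python) =====
-- def _extremes(values, good_is_high=True):
--     """Return (best_i, best_v, worst_i, worst_v) or None if fewer than 2 points."""
--     pairs = [(i, v) for i, v in enumerate(values) if v is not None]
--     if len(pairs) < 2:
--         return None
--     max_i, max_v = max(pairs, key=lambda p: p[1])
--     min_i, min_v = min(pairs, key=lambda p: p[1])
--     if good_is_high:
--         return max_i, max_v, min_i, min_v
--     return min_i, min_v, max_i, max_v
-- ===== SOURCE B (Python) =====
-- def _extremes(values, good_is_high=True):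
--     """Single pass: running (index, value) for max and min, counting non-None points."""
--     count = 0
--     max_i = max_v = min_i = min_v = None
--     for i, v in enumerate(values):
--         if v is None:
--             continue
--         count += 1
--         if count == 1:
--             max_i = min_i = i
--             max_v = min_v = v
--         else:
--             if v > max_v:
--                 max_i, max_v = i, v
--             if v < min_v:
--                 min_i, min_v = i, v
--     if count < 2:
--         return None
--     if good_is_high:
--         return max_i, max_v, min_i, min_v
--     return min_i, min_v, max_i, max_v
-- ===== Notes on version B (the rewrite author's own statement) =====
-- stated objective: faster
-- what changed: Replaces building an intermediate (index,value) pairs list plus two separate max/min passes with key-lambdas by one fused loop over enumerate(values) that maintains running (max_i,max_v) and (min_i,min_v) with strict comparisons and a non-None counter.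
import Mathlib
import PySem

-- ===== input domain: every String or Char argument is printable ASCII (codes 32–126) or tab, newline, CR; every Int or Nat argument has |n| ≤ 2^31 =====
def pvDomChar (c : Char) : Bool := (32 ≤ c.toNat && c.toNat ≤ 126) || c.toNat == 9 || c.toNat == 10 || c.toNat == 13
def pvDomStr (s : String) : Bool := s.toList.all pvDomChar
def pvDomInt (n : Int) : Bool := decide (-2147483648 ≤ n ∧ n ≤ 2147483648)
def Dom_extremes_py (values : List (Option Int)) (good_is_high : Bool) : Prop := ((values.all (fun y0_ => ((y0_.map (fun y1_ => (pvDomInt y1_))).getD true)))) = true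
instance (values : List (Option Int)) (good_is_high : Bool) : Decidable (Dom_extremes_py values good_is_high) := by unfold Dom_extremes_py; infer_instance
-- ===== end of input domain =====

-- B fuses A's pairs-list construction and its two max/min passes into one running-extremes loop (constant-factor change; return value proved equal).


-- ===== PORT A =====
-- pairs = [(i, v) for i, v in enumerate(values) if v is not None]
def extremesPairs (values : List (Option Int)) : List (Int × Int) :=
  (PySem.List.enumerate values 0).filterMap (fun p => p.2.map (fun v => (p.1, v)))

def extremes_py (values : List (Option Int)) (good_is_high : Bool) : Option (Int × Int × Int × Int) :=
  let pairs := extremesPairs values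
  if pairs.length < 2 then none
  else
    match PySem.List.max? pairs (fun p => p.2), PySem.List.min? pairs (fun p => p.2) with
    | some (max_i, max_v), some (min_i, min_v) =>
        if good_is_high then some (max_i, max_v, min_i, min_v)
        else some (min_i, min_v, max_i, max_v)
    | _, _ => none  -- unreachable: pairs has ≥ 2 elements here

-- ===== PORT B =====
-- loop body of Source B: state = (count, running (max_i, max_v, min_i, min_v) or none before the first point)
def altStep (acc : Int × Option (Int × Int × Int × Int)) (p : Int × Option Int) :
    Int × Option (Int × Int × Int × Int) :=
  match p.2 with
  | none => acc
  | some v =>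
    match acc.2 with
    | none => (acc.1 + 1, some (p.1, v, p.1, v))
    | some (max_i, max_v, min_i, min_v) =>
        (acc.1 + 1,
         some (if max_v < v then (p.1, v, if v < min_v then (p.1, v) else (min_i, min_v))
               else (max_i, max_v, if v < min_v then (p.1, v) else (min_i, min_v))))

def extremes_py_alt (values : List (Option Int)) (good_is_high : Bool) : Option (Int × Int × Int × Int) :=
  let st := (PySem.List.enumerate values 0).foldl altStep (0, none)
  if st.1 < 2 then none
  else
    match st.2 with
    | some (max_i, max_v, min_i, min_v) =>
        if good_is_high then some (max_i, max_v, min_i, min_v)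
        else some (min_i, min_v, max_i, max_v)
    | none => none  -- unreachable: count ≥ 2 here

-- ===== PRECONDITION & SPEC =====
def Spec_extremes_py (values : List (Option Int)) (good_is_high : Bool) (out : Option (Int × Int × Int × Int)) : Prop := out = extremes_py_alt values good_is_high
instance (values : List (Option Int)) (good_is_high : Bool) (out : Option (Int × Int × Int × Int)) : Decidable (Spec_extremes_py values good_is_high out) := by unfold Spec_extremes_py; infer_instance

-- ===== CLAIM (what is proved, stated in full; the proofs are below) =====
def Claim_equal_extremes_py : Prop := ∀ (values : List (Option Int)) (good_is_high : Bool), Dom_extremes_py values good_is_high → Spec_extremes_py values good_is_high (extremes_py values good_is_high)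

-- ===== LEMMAS AND PROOFS =====

-- running max/min with a seed, over (index, value) pairs compared by value
def runMax (m : Int × Int) (l : List (Int × Int)) : Int × Int :=
  l.foldl (fun m x => if m.2 < x.2 then x else m) m
def runMin (m : Int × Int) (l : List (Int × Int)) : Int × Int :=
  l.foldl (fun m x => if x.2 < m.2 then x else m) m

-- B's step, re-expressed on the already-filtered (index, value) pairs
def pairsStep (acc : Int × Option (Int × Int × Int × Int)) (q : Int × Int) :
    Int × Option (Int × Int × Int × Int) :=
  match acc.2 with
  | none => (acc.1 + 1, some (q.1, q.2, q.1, q.2))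
  | some (max_i, max_v, min_i, min_v) =>
      (acc.1 + 1,
       some (if max_v < q.2 then (q.1, q.2, if q.2 < min_v then (q.1, q.2) else (min_i, min_v))
             else (max_i, max_v, if q.2 < min_v then (q.1, q.2) else (min_i, min_v))))

theorem max?_cons_runMax (l : List (Int × Int)) :
    ∀ p : Int × Int, PySem.List.max? (p :: l) (fun q => q.2) = some (runMax p l) := by
  induction l with
  | nil => intro p; simp [PySem.List.max?, runMax]
  | cons x t ih =>
      intro p
      have hx := ih (if p.2 < x.2 then x else p)
      simp only [PySem.List.max?, List.foldl_cons, runMax] at hx ⊢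
      by_cases h : p.2 < x.2 <;> simp [h] at hx ⊢ <;> exact hx

theorem min?_cons_runMin (l : List (Int × Int)) :
    ∀ p : Int × Int, PySem.List.min? (p :: l) (fun q => q.2) = some (runMin p l) := by
  induction l with
  | nil => intro p; simp [PySem.List.min?, runMin]
  | cons x t ih =>
      intro p
      have hx := ih (if x.2 < p.2 then x else p)
      simp only [PySem.List.min?, List.foldl_cons, runMin] at hx ⊢
      by_cases h : x.2 < p.2 <;> simp [h] at hx ⊢ <;> exact hx

-- B's fold over enumerate is the same fold over the filtered pairs list
theorem altFold_eq_pairs_fold (values : List (Option Int)) (acc : Int × Option (Int × Int × Int × Int)) :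
    (PySem.List.enumerate values 0).foldl altStep acc
      = (extremesPairs values).foldl pairsStep acc := by
  unfold extremesPairs
  rw [List.foldl_filterMap]
  apply PySem.List.foldl_congr_mem
  intro a p _
  rcases p with ⟨i, v⟩
  cases v <;> rfl

-- the pairs fold, seeded after the first point, computes the running max and min and counts
theorem pairs_fold_char (l : List (Int × Int)) (c : Int) (mi mv ni nv : Int) :
    l.foldl pairsStep (c, some (mi, mv, ni, nv))
      = (c + l.length,
         some ((runMax (mi, mv) l).1, (runMax (mi, mv) l).2,
               (runMin (ni, nv) l).1, (runMin (ni, nv) l).2)) := by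
  induction l generalizing c mi mv ni nv with
  | nil => simp [runMax, runMin]
  | cons x t ih =>
      simp only [List.foldl_cons, pairsStep, runMax, runMin] at *
      by_cases h1 : mv < x.2 <;> by_cases h2 : x.2 < nv <;>
        simp [h1, h2, ih] <;> omega

-- ===== VERDICT (by name: the statement is the Claim_ definition above) =====
theorem extremes_py_spec : Claim_equal_extremes_py := by
  intro values good_is_high _
  unfold Spec_extremes_py extremes_py extremes_py_alt
  rw [altFold_eq_pairs_fold]
  rcases hE : extremesPairs values with _ | ⟨p, t⟩
  · simp
  · rw [List.foldl_cons,
      show pairsStep (0, none) p = (1, some (p.1, p.2, p.1, p.2)) from rfl,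
      pairs_fold_char]
    dsimp only
    simp only [Prod.mk.eta]
    rw [max?_cons_runMax, min?_cons_runMin]
    rcases hM : runMax p t with ⟨mi, mv⟩
    rcases hm : runMin p t with ⟨ni, nv⟩
    rcases t with _ | ⟨q, r⟩
    · simp
    · simp
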